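-- pv_equiv track=rewrite | github.com/jasonchung11/my-projects | cs1110/labs/lab14/lab14.py | number_not
-- ===== SOURCE A (Python) =====
-- def number_not(thelist, v):
--     """
--     Returns the number of elements in thelist that are NOT v.
--
--     Parameter thelist: the list to search
--     Precondition: thelist is a list of ints
--
--     Parameter v: the value to search for
--     Precondition: v is an int
--     """
--     if thelist == []:
--         return 0
--     elif len(thelist) == 1:
--         if thelist[0] == v:
--             return 0
--         else:
--             return 1
--
--     left = number_not(thelist[:1],v)
--     right = number_not(thelist[1:],v)
--
--     return left+right
-- ===== SOURCE B (Python) =====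
-- def number_not(thelist, v):
--     count = 0
--     for x in thelist:
--         if x != v:
--             count += 1
--     return count
-- ===== Notes on version B (the rewrite author's own statement) =====
-- stated objective: faster
-- what changed: Replaced the slicing divide-into-head-and-tail recursion with a single iterative accumulator loop over the list.
import Mathlib
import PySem

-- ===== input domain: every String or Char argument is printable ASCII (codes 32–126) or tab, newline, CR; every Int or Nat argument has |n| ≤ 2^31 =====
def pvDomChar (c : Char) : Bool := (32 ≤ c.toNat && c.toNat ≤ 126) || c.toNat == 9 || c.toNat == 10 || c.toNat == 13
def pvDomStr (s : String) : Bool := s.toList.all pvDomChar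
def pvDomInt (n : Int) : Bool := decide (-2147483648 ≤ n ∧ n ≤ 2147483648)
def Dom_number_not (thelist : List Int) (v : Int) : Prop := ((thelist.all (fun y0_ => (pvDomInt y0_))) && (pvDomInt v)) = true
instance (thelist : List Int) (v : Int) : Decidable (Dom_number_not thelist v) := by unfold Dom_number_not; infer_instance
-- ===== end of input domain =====

-- B replaces A's quadratic slice-and-recurse scheme with a single iterative counting loop.

-- ===== PORT A =====
-- literal port of A: base cases for [] and length 1, otherwise recurse on thelist[:1] and thelist[1:]
def number_not (thelist : List Int) (v : Int) : Int :=
  if thelist = [] then 0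
  else if thelist.length = 1 then
    (if PySem.List.pyGet? thelist 0 = some v then 0 else 1)
  else
    let left := number_not (PySem.List.slice thelist (some 0) (some 1)) v
    let right := number_not (PySem.List.slice thelist (some 1) none) v
    left + right
termination_by thelist.length
decreasing_by
  all_goals simp_all [PySem.List.slice]
  all_goals
    rename_i h1 h2
    have h0 : 0 < thelist.length := List.length_pos_iff.mpr h1
    omega

-- ===== PORT B =====
-- literal port of B: explicit loop with accumulator count
def number_not_alt (thelist : List Int) (v : Int) : Int :=
  thelist.foldl (fun count x => if x ≠ v then count + 1 else count) 0

-- ===== PRECONDITION & SPEC =====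
def Spec_number_not (thelist : List Int) (v : Int) (out : Int) : Prop := out = number_not_alt thelist v
instance (thelist : List Int) (v : Int) (out : Int) : Decidable (Spec_number_not thelist v out) := by unfold Spec_number_not; infer_instance

-- ===== CLAIM (what is proved, stated in full; the proofs are below) =====
def Claim_equal_number_not : Prop := ∀ (thelist : List Int) (v : Int), Dom_number_not thelist v → Spec_number_not thelist v (number_not thelist v)

-- ===== LEMMAS AND PROOFS =====

theorem alt_foldl_shift (thelist : List Int) (v c : Int) :
    thelist.foldl (fun count x => if x ≠ v then count + 1 else count) c
      = c + thelist.foldl (fun count x => if x ≠ v then count + 1 else count) 0 := by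
  induction thelist generalizing c with
  | nil => simp
  | cons x xs ih =>
    simp only [List.foldl_cons]
    rw [ih, ih (if x ≠ v then 0 + 1 else 0)]
    by_cases h : x = v <;> simp [h] <;> ring

theorem alt_cons (x : Int) (xs : List Int) (v : Int) :
    number_not_alt (x :: xs) v = (if x = v then 0 else 1) + number_not_alt xs v := by
  simp only [number_not_alt, List.foldl_cons]
  rw [alt_foldl_shift]
  by_cases h : x = v <;> simp [h]

theorem a_eq_b (thelist : List Int) (v : Int) :
    number_not thelist v = number_not_alt thelist v := by
  induction thelist with
  | nil => simp [number_not, number_not_alt]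
  | cons x xs ih =>
    rw [number_not]
    by_cases hx : xs = []
    · subst hx
      by_cases h : x = v <;>
        simp [number_not_alt, h, PySem.List.pyGet?, PySem.List.pyIdx?]
    · have hlen : (x :: xs).length ≠ 1 := by simpa using hx
      simp only [if_neg (by simp : ¬ (x :: xs) = []), if_neg hlen]
      have h1 : PySem.List.slice (x :: xs) (some 0) (some 1) = [x] := by
        simp [PySem.List.slice]
      have h2 : PySem.List.slice (x :: xs) (some 1) none = xs := by
        rw [PySem.List.slice_from_one]
        rfl
      rw [h1, h2, ih, alt_cons]
      by_cases hv : x = v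
      · simp [number_not, hv, PySem.List.pyGet?, PySem.List.pyIdx?]
      · simp [number_not, hv, PySem.List.pyGet?, PySem.List.pyIdx?]

-- ===== VERDICT (by name: the statement is the Claim_ definition above) =====
theorem number_not_spec : Claim_equal_number_not := by
  intro thelist v _
  unfold Spec_number_not
  exact a_eq_b thelist v
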